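-- pv_equiv track=rewrite | github.com/Kayemahmed2/Telegram-checker-bot-by-kayem5 | main (4).py | get_country_flag
-- ===== SOURCE A (Python) =====
-- def get_country_flag(phone: str) -> str:
--     """🌍 Premium country detection"""
--     flags = {
--         '+880': '🇧🇩', '+91': '🇮🇳', '+1': '🇺🇸', '+44': '🇬🇧',
--         '+966': '🇸🇦', '+971': '🇦🇪', '+92': '🇵🇰', '+972': '🇮🇱',
--         '+33': '🇫🇷', '+49': '🇩🇪', '+39': '🇮🇹', '+34': '🇪🇸',
--         '+86': '🇨🇳', '+81': '🇯🇵', '+82': '🇰🇷', '+7': '🇷🇺'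
--     }
--
--     for code, flag in flags.items():
--         if phone.startswith(code):
--             return flag
--     return '🌍'
-- ===== SOURCE B (Python) =====
-- def get_country_flag(phone: str) -> str:
--     """🌍 Premium country detection"""
--     match list(phone[:4]):
--         case ['+', '8', '8', '0']: return '🇧🇩'
--         case ['+', '8', '6', *_]: return '🇨🇳'
--         case ['+', '8', '1', *_]: return '🇯🇵'
--         case ['+', '8', '2', *_]: return '🇰🇷'
--         case ['+', '9', '1', *_]: return '🇮🇳'
--         case ['+', '9', '2', *_]: return '🇵🇰'
--         case ['+', '9', '6', '6']: return '🇸🇦'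
--         case ['+', '9', '7', '1']: return '🇦🇪'
--         case ['+', '9', '7', '2']: return '🇮🇱'
--         case ['+', '1', *_]: return '🇺🇸'
--         case ['+', '4', '4', *_]: return '🇬🇧'
--         case ['+', '4', '9', *_]: return '🇩🇪'
--         case ['+', '3', '3', *_]: return '🇫🇷'
--         case ['+', '3', '9', *_]: return '🇮🇹'
--         case ['+', '3', '4', *_]: return '🇪🇸'
--         case ['+', '7', *_]: return '🇷🇺'
--         case _: return '🌍'
-- ===== Notes on version B (the rewrite author's own statement) =====
-- stated objective: alternative
-- what changed: Replaced the linear first-match scan over the 16-entry dict with startswith by a structural pattern match (decision tree) on the first four characters phone[:4]; the key set is prefix-free, so first-match and the decision tree coincide.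
import Mathlib
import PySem

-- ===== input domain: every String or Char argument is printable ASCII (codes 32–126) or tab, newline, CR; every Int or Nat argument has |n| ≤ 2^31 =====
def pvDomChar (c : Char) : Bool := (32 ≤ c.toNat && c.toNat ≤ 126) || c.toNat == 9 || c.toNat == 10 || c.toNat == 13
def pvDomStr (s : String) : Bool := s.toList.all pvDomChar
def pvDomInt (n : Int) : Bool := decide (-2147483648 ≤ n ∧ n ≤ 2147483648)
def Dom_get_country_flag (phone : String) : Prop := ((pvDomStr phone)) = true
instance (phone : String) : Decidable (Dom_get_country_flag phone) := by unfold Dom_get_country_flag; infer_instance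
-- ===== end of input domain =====

-- B replaces A's first-match scan over the 16-entry dict with `startswith` by a
-- structural pattern match (a decision tree) on the first four characters phone[:4];
-- the key set is prefix-free, so the two matching rules agree. Objective: alternative.

-- ===== PORT A =====
def pvFlagsA : List (String × String) :=
  [("+880","🇧🇩"),("+91","🇮🇳"),("+1","🇺🇸"),("+44","🇬🇧"),
   ("+966","🇸🇦"),("+971","🇦🇪"),("+92","🇵🇰"),("+972","🇮🇱"),
   ("+33","🇫🇷"),("+49","🇩🇪"),("+39","🇮🇹"),("+34","🇪🇸"),
   ("+86","🇨🇳"),("+81","🇯🇵"),("+82","🇰🇷"),("+7","🇷🇺")]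

-- `for code, flag in flags.items(): if phone.startswith(code): return flag`
def pvScanA : List (String × String) → String → String
  | [], _ => "🌍"
  | (code, flag) :: rest, phone =>
      if PySem.Str.startswith phone code then flag else pvScanA rest phone

def get_country_flag (phone : String) : String :=
  pvScanA (PySem.Dict.ofList pvFlagsA).items phone

-- ===== PORT B =====
-- `match list(phone[:4]): case ['+','8','8','0']: … case ['+','8','6',*_]: …`
def get_country_flag_alt (phone : String) : String :=
  match (PySem.Str.slice phone none (some 4)).toList with
  | ['+', '8', '8', '0']     => "🇧🇩"
  | '+' :: '8' :: '6' :: _   => "🇨🇳"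
  | '+' :: '8' :: '1' :: _   => "🇯🇵"
  | '+' :: '8' :: '2' :: _   => "🇰🇷"
  | '+' :: '9' :: '1' :: _   => "🇮🇳"
  | '+' :: '9' :: '2' :: _   => "🇵🇰"
  | ['+', '9', '6', '6']     => "🇸🇦"
  | ['+', '9', '7', '1']     => "🇦🇪"
  | ['+', '9', '7', '2']     => "🇮🇱"
  | '+' :: '1' :: _          => "🇺🇸"
  | '+' :: '4' :: '4' :: _   => "🇬🇧"
  | '+' :: '4' :: '9' :: _   => "🇩🇪"
  | '+' :: '3' :: '3' :: _   => "🇫🇷"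
  | '+' :: '3' :: '9' :: _   => "🇮🇹"
  | '+' :: '3' :: '4' :: _   => "🇪🇸"
  | '+' :: '7' :: _          => "🇷🇺"
  | _                        => "🌍"

-- ===== PRECONDITION & SPEC =====
def Spec_get_country_flag (phone : String) (out : String) : Prop := out = get_country_flag_alt phone
instance (phone : String) (out : String) : Decidable (Spec_get_country_flag phone out) := by unfold Spec_get_country_flag; infer_instance

-- ===== CLAIM (what is proved, stated in full; the proofs are below) =====
def Claim_equal_get_country_flag : Prop := ∀ (phone : String), Dom_get_country_flag phone → Spec_get_country_flag phone (get_country_flag phone)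

-- ===== LEMMAS AND PROOFS =====
lemma itemsA_eq : (PySem.Dict.ofList pvFlagsA).items = pvFlagsA := rfl

lemma sw_gen (cs : List Char) (code : String) :
    PySem.Str.startswith (String.ofList cs) code = decide (List.take code.toList.length cs = code.toList) := by
  rw [PySem.Str.startswith_eq, String.toList_ofList, Bool.eq_iff_iff]
  simp only [PySem.Chars.startswith_iff, decide_eq_true_eq, List.prefix_iff_eq_take]
  exact eq_comm

lemma sw880 (cs : List Char) :
    PySem.Str.startswith (String.ofList cs) "+880" = decide (List.take 4 cs = ['+', '8', '8', '0']) :=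
  sw_gen cs "+880"
lemma sw91 (cs : List Char) :
    PySem.Str.startswith (String.ofList cs) "+91" = decide (List.take 3 cs = ['+', '9', '1']) :=
  sw_gen cs "+91"
lemma sw1 (cs : List Char) :
    PySem.Str.startswith (String.ofList cs) "+1" = decide (List.take 2 cs = ['+', '1']) :=
  sw_gen cs "+1"
lemma sw44 (cs : List Char) :
    PySem.Str.startswith (String.ofList cs) "+44" = decide (List.take 3 cs = ['+', '4', '4']) :=
  sw_gen cs "+44"
lemma sw966 (cs : List Char) :
    PySem.Str.startswith (String.ofList cs) "+966" = decide (List.take 4 cs = ['+', '9', '6', '6']) :=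
  sw_gen cs "+966"
lemma sw971 (cs : List Char) :
    PySem.Str.startswith (String.ofList cs) "+971" = decide (List.take 4 cs = ['+', '9', '7', '1']) :=
  sw_gen cs "+971"
lemma sw92 (cs : List Char) :
    PySem.Str.startswith (String.ofList cs) "+92" = decide (List.take 3 cs = ['+', '9', '2']) :=
  sw_gen cs "+92"
lemma sw972 (cs : List Char) :
    PySem.Str.startswith (String.ofList cs) "+972" = decide (List.take 4 cs = ['+', '9', '7', '2']) :=
  sw_gen cs "+972"
lemma sw33 (cs : List Char) :
    PySem.Str.startswith (String.ofList cs) "+33" = decide (List.take 3 cs = ['+', '3', '3']) :=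
  sw_gen cs "+33"
lemma sw49 (cs : List Char) :
    PySem.Str.startswith (String.ofList cs) "+49" = decide (List.take 3 cs = ['+', '4', '9']) :=
  sw_gen cs "+49"
lemma sw39 (cs : List Char) :
    PySem.Str.startswith (String.ofList cs) "+39" = decide (List.take 3 cs = ['+', '3', '9']) :=
  sw_gen cs "+39"
lemma sw34 (cs : List Char) :
    PySem.Str.startswith (String.ofList cs) "+34" = decide (List.take 3 cs = ['+', '3', '4']) :=
  sw_gen cs "+34"
lemma sw86 (cs : List Char) :
    PySem.Str.startswith (String.ofList cs) "+86" = decide (List.take 3 cs = ['+', '8', '6']) :=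
  sw_gen cs "+86"
lemma sw81 (cs : List Char) :
    PySem.Str.startswith (String.ofList cs) "+81" = decide (List.take 3 cs = ['+', '8', '1']) :=
  sw_gen cs "+81"
lemma sw82 (cs : List Char) :
    PySem.Str.startswith (String.ofList cs) "+82" = decide (List.take 3 cs = ['+', '8', '2']) :=
  sw_gen cs "+82"
lemma sw7 (cs : List Char) :
    PySem.Str.startswith (String.ofList cs) "+7" = decide (List.take 2 cs = ['+', '7']) :=
  sw_gen cs "+7"

set_option maxHeartbeats 1000000 in
lemma pv_core (cs : List Char) :
    get_country_flag (String.ofList cs) = get_country_flag_alt (String.ofList cs) := by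
  have hsl : (PySem.Str.slice (String.ofList cs) none (some 4)).toList = List.take 4 cs := by
    rw [PySem.Str.toList_slice, PySem.Chars.slice_eq_listSlice, String.toList_ofList,
        PySem.List.slice_to _ (by norm_num)]
    rfl
  rw [get_country_flag, itemsA_eq]
  simp only [pvFlagsA, pvScanA, sw880, sw91, sw1, sw44, sw966, sw971, sw92, sw972, sw33, sw49, sw39, sw34, sw86, sw81, sw82, sw7, decide_eq_true_eq]
  simp only [get_country_flag_alt]
  rw [hsl]
  by_cases h880 : List.take 4 cs = ['+', '8', '8', '0']
  ·
    simp [h880]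
  by_cases h91 : List.take 3 cs = ['+', '9', '1']
  ·
    have f91_4 : List.take 4 cs = ['+', '9', '1'] ++ List.take 1 (List.drop 3 cs) := by
      rw [show (4:Nat) = 3 + 1 from rfl, List.take_add, h91]
    simp [h91, f91_4]
  by_cases h1 : List.take 2 cs = ['+', '1']
  ·
    have f1_3 : List.take 3 cs = ['+', '1'] ++ List.take 1 (List.drop 2 cs) := by
      rw [show (3:Nat) = 2 + 1 from rfl, List.take_add, h1]
    have f1_4 : List.take 4 cs = ['+', '1'] ++ List.take 2 (List.drop 2 cs) := by
      rw [show (4:Nat) = 2 + 2 from rfl, List.take_add, h1]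
    simp [h1, f1_3, f1_4]
  by_cases h44 : List.take 3 cs = ['+', '4', '4']
  ·
    have f44_2 : List.take 2 cs = ['+', '4'] := by
      have := congrArg (List.take 2) h44; simpa [List.take_take] using this
    have f44_4 : List.take 4 cs = ['+', '4', '4'] ++ List.take 1 (List.drop 3 cs) := by
      rw [show (4:Nat) = 3 + 1 from rfl, List.take_add, h44]
    simp [h44, f44_2, f44_4]
  by_cases h966 : List.take 4 cs = ['+', '9', '6', '6']
  ·
    have f966_2 : List.take 2 cs = ['+', '9'] := by
      have := congrArg (List.take 2) h966; simpa [List.take_take] using this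
    have f966_3 : List.take 3 cs = ['+', '9', '6'] := by
      have := congrArg (List.take 3) h966; simpa [List.take_take] using this
    simp [h966, f966_2, f966_3]
  by_cases h971 : List.take 4 cs = ['+', '9', '7', '1']
  ·
    have f971_2 : List.take 2 cs = ['+', '9'] := by
      have := congrArg (List.take 2) h971; simpa [List.take_take] using this
    have f971_3 : List.take 3 cs = ['+', '9', '7'] := by
      have := congrArg (List.take 3) h971; simpa [List.take_take] using this
    simp [h971, f971_2, f971_3]
  by_cases h92 : List.take 3 cs = ['+', '9', '2']
  ·
    have f92_2 : List.take 2 cs = ['+', '9'] := by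
      have := congrArg (List.take 2) h92; simpa [List.take_take] using this
    have f92_4 : List.take 4 cs = ['+', '9', '2'] ++ List.take 1 (List.drop 3 cs) := by
      rw [show (4:Nat) = 3 + 1 from rfl, List.take_add, h92]
    simp [h92, f92_2, f92_4]
  by_cases h972 : List.take 4 cs = ['+', '9', '7', '2']
  ·
    have f972_2 : List.take 2 cs = ['+', '9'] := by
      have := congrArg (List.take 2) h972; simpa [List.take_take] using this
    have f972_3 : List.take 3 cs = ['+', '9', '7'] := by
      have := congrArg (List.take 3) h972; simpa [List.take_take] using this
    simp [h972, f972_2, f972_3]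
  by_cases h33 : List.take 3 cs = ['+', '3', '3']
  ·
    have f33_2 : List.take 2 cs = ['+', '3'] := by
      have := congrArg (List.take 2) h33; simpa [List.take_take] using this
    have f33_4 : List.take 4 cs = ['+', '3', '3'] ++ List.take 1 (List.drop 3 cs) := by
      rw [show (4:Nat) = 3 + 1 from rfl, List.take_add, h33]
    simp [h33, f33_2, f33_4]
  by_cases h49 : List.take 3 cs = ['+', '4', '9']
  ·
    have f49_2 : List.take 2 cs = ['+', '4'] := by
      have := congrArg (List.take 2) h49; simpa [List.take_take] using this
    have f49_4 : List.take 4 cs = ['+', '4', '9'] ++ List.take 1 (List.drop 3 cs) := by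
      rw [show (4:Nat) = 3 + 1 from rfl, List.take_add, h49]
    simp [h49, f49_2, f49_4]
  by_cases h39 : List.take 3 cs = ['+', '3', '9']
  ·
    have f39_2 : List.take 2 cs = ['+', '3'] := by
      have := congrArg (List.take 2) h39; simpa [List.take_take] using this
    have f39_4 : List.take 4 cs = ['+', '3', '9'] ++ List.take 1 (List.drop 3 cs) := by
      rw [show (4:Nat) = 3 + 1 from rfl, List.take_add, h39]
    simp [h39, f39_2, f39_4]
  by_cases h34 : List.take 3 cs = ['+', '3', '4']
  ·
    have f34_2 : List.take 2 cs = ['+', '3'] := by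
      have := congrArg (List.take 2) h34; simpa [List.take_take] using this
    have f34_4 : List.take 4 cs = ['+', '3', '4'] ++ List.take 1 (List.drop 3 cs) := by
      rw [show (4:Nat) = 3 + 1 from rfl, List.take_add, h34]
    simp [h34, f34_2, f34_4]
  by_cases h86 : List.take 3 cs = ['+', '8', '6']
  ·
    have f86_2 : List.take 2 cs = ['+', '8'] := by
      have := congrArg (List.take 2) h86; simpa [List.take_take] using this
    have f86_4 : List.take 4 cs = ['+', '8', '6'] ++ List.take 1 (List.drop 3 cs) := by
      rw [show (4:Nat) = 3 + 1 from rfl, List.take_add, h86]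
    simp [h86, f86_2, f86_4]
  by_cases h81 : List.take 3 cs = ['+', '8', '1']
  ·
    have f81_2 : List.take 2 cs = ['+', '8'] := by
      have := congrArg (List.take 2) h81; simpa [List.take_take] using this
    have f81_4 : List.take 4 cs = ['+', '8', '1'] ++ List.take 1 (List.drop 3 cs) := by
      rw [show (4:Nat) = 3 + 1 from rfl, List.take_add, h81]
    simp [h81, f81_2, f81_4]
  by_cases h82 : List.take 3 cs = ['+', '8', '2']
  ·
    have f82_2 : List.take 2 cs = ['+', '8'] := by
      have := congrArg (List.take 2) h82; simpa [List.take_take] using this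
    have f82_4 : List.take 4 cs = ['+', '8', '2'] ++ List.take 1 (List.drop 3 cs) := by
      rw [show (4:Nat) = 3 + 1 from rfl, List.take_add, h82]
    simp [h82, f82_2, f82_4]
  by_cases h7 : List.take 2 cs = ['+', '7']
  ·
    have f7_3 : List.take 3 cs = ['+', '7'] ++ List.take 1 (List.drop 2 cs) := by
      rw [show (3:Nat) = 2 + 1 from rfl, List.take_add, h7]
    have f7_4 : List.take 4 cs = ['+', '7'] ++ List.take 2 (List.drop 2 cs) := by
      rw [show (4:Nat) = 2 + 2 from rfl, List.take_add, h7]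
    simp [h7, f7_3, f7_4]
  rw [if_neg h880, if_neg h91, if_neg h1, if_neg h44, if_neg h966, if_neg h971, if_neg h92, if_neg h972, if_neg h33, if_neg h49, if_neg h39, if_neg h34, if_neg h86, if_neg h81, if_neg h82, if_neg h7]
  split
  next heq => exact absurd heq h880
  next heq => exact absurd (by simpa [List.take_take] using congrArg (List.take 3) heq) h86
  next heq => exact absurd (by simpa [List.take_take] using congrArg (List.take 3) heq) h81
  next heq => exact absurd (by simpa [List.take_take] using congrArg (List.take 3) heq) h82
  next heq => exact absurd (by simpa [List.take_take] using congrArg (List.take 3) heq) h91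
  next heq => exact absurd (by simpa [List.take_take] using congrArg (List.take 3) heq) h92
  next heq => exact absurd heq h966
  next heq => exact absurd heq h971
  next heq => exact absurd heq h972
  next heq => exact absurd (by simpa [List.take_take] using congrArg (List.take 2) heq) h1
  next heq => exact absurd (by simpa [List.take_take] using congrArg (List.take 3) heq) h44
  next heq => exact absurd (by simpa [List.take_take] using congrArg (List.take 3) heq) h49
  next heq => exact absurd (by simpa [List.take_take] using congrArg (List.take 3) heq) h33
  next heq => exact absurd (by simpa [List.take_take] using congrArg (List.take 3) heq) h39
  next heq => exact absurd (by simpa [List.take_take] using congrArg (List.take 3) heq) h34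
  next heq => exact absurd (by simpa [List.take_take] using congrArg (List.take 2) heq) h7
  next => rfl

-- ===== VERDICT (by name: the statement is the Claim_ definition above) =====
theorem get_country_flag_spec : Claim_equal_get_country_flag := by
  intro phone _
  unfold Spec_get_country_flag
  have h := pv_core phone.toList
  rwa [String.ofList_toList] at h
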